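-- pv_equiv track=rewrite | github.com/jzbjyb/RelEnt | run.py | get_all_cateid
-- ===== SOURCE A (Python) =====
-- def get_all_cateid(leaf_cate, cateid2cateid, root={'14105005', '7345184'}):
--     '''
--     Recursively get all the categories starting from the leaf categories from `leaf_cate`
--     `root` is the id of the root category, whose default value are `Category:Content`
--     and `Category:Main_topic_classifications`
--     '''
--     all = set()
--     def recur(cate_set, all):
--         if len(cate_set) == 0:
--             return
--         next_cate_set = set()
--         all |= cate_set
--         reach_root = False
--         for cate in cate_set:
--             if cate in cateid2cateid: # has parent cates
--                 ne = set(cateid2cateid[cate])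
--                 if len(ne & root) > 0:
--                     reach_root = True
--                     break
--                 next_cate_set |= ne
--         if not reach_root: # stop when reaching root, otherwise categories become unstable
--             next_cate_set -= all
--             recur(next_cate_set, all)
--     recur(leaf_cate, all)
--     return all
-- ===== SOURCE B (Python) =====
-- def get_all_cateid(leaf_cate, cateid2cateid, root={'14105005', '7345184'}):
--     all_ids = set()
--     frontier = set(leaf_cate)
--     while frontier:
--         all_ids |= frontier
--         nbrs = [set(cateid2cateid[c]) for c in frontier if c in cateid2cateid]
--         if any(ne & root for ne in nbrs):
--             break
--         frontier = set().union(*nbrs) - all_ids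
--     return all_ids
-- ===== Notes on version B (the rewrite author's own statement) =====
-- stated objective: simpler
-- what changed: Replaces A's nested recursive helper that mutates a shared `all` set and breaks mid-scan with a flat iterative while-loop per BFS level, computing the neighbour sets once by a comprehension and the root test with any(); the break disappears because the partially built next set is discarded anyway.
import Mathlib
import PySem

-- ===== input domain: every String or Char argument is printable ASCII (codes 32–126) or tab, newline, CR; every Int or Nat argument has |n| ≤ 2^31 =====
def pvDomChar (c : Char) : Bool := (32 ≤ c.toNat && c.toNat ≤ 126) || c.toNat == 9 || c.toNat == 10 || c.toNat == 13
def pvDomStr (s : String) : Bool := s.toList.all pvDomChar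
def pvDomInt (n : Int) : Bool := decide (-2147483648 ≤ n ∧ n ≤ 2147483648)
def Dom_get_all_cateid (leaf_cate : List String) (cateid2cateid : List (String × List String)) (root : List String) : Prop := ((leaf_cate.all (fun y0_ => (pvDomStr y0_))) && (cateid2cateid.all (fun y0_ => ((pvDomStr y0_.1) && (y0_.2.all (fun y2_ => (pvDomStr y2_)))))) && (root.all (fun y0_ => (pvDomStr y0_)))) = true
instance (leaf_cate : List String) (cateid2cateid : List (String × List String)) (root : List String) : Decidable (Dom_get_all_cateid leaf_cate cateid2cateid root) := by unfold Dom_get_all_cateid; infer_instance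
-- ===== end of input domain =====

-- B replaces A's nested recursion (inner `recur` mutating `all`, with a mid-scan break) by a
-- flat iterative level loop built from comprehensions and `any`; same return value, similar cost.
-- Both ports use the same totality fuel (|leaf| + total dict-value length + 1), which bounds the
-- number of level iterations since each iteration strictly grows `all` within that universe.

-- ===== PORT A =====
-- the inner `for cate in cate_set:` loop of A's `recur`: threads `next_cate_set`, breaks
-- (returning true) as soon as some neighbour set meets `root`
def pvScanA (c2c : List (String × List String)) (root : List String) :
    List String → List String → Bool × List String
  | [], next => (false, next)
  | cate :: rest, next =>
    match PySem.Dict.get? (PySem.Dict.mk c2c) cate with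
    | none => pvScanA c2c root rest next
    | some v =>
      let ne := PySem.Set.ofList v
      if 0 < (PySem.Set.inter ne root).length then (true, next)   -- len(ne & root) > 0
      else pvScanA c2c root rest (PySem.Set.union next ne)

-- A's `recur(cate_set, all)` (mutation of `all` becomes returning the updated set); fuel only for totality
def pvRecurA (c2c : List (String × List String)) (root : List String) :
    Nat → List String → List String → List String
  | 0, _, all => all
  | fuel+1, cate_set, all =>
    if cate_set.length = 0 then all
    else
      let all2 := PySem.Set.union all cate_set          -- all |= cate_set
      let r := pvScanA c2c root cate_set PySem.Set.empty
      if r.1 then all2                                  -- reach_root: stop, return all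
      else pvRecurA c2c root fuel (PySem.Set.diff r.2 all2) all2   -- next_cate_set -= all; recur

def get_all_cateid (leaf_cate : List String) (cateid2cateid : List (String × List String)) (root : List String) : List String :=
  pvRecurA cateid2cateid root
    (leaf_cate.length + (cateid2cateid.map (fun p => p.2.length)).sum + 1)
    leaf_cate PySem.Set.empty

-- ===== PORT B =====
-- [set(cateid2cateid[c]) for c in frontier if c in cateid2cateid]
def pvNbrs (c2c : List (String × List String)) (frontier : List String) : List (List String) :=
  frontier.filterMap (fun c => (PySem.Dict.get? (PySem.Dict.mk c2c) c).map PySem.Set.ofList)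

-- B's `while frontier:` loop; fuel only for totality
def pvLoopB (c2c : List (String × List String)) (root : List String) :
    Nat → List String → List String → List String
  | 0, all, _ => all
  | fuel+1, all, frontier =>
    if frontier.isEmpty then all
    else
      let all2 := PySem.Set.union all frontier                    -- all_ids |= frontier
      let nbrs := pvNbrs c2c frontier
      if nbrs.any (fun ne => !(PySem.Set.isdisjoint ne root)) then all2   -- any(ne & root …): break
      else pvLoopB c2c root fuel all2
        (PySem.Set.diff (nbrs.foldl (fun s ne => PySem.Set.union s ne) PySem.Set.empty) all2)

def get_all_cateid_alt (leaf_cate : List String) (cateid2cateid : List (String × List String)) (root : List String) : List String :=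
  pvLoopB cateid2cateid root
    (leaf_cate.length + (cateid2cateid.map (fun p => p.2.length)).sum + 1)
    PySem.Set.empty leaf_cate

-- ===== PRECONDITION & SPEC =====
def Spec_get_all_cateid (leaf_cate : List String) (cateid2cateid : List (String × List String)) (root : List String) (out : List String) : Prop := out = get_all_cateid_alt leaf_cate cateid2cateid root
instance (leaf_cate : List String) (cateid2cateid : List (String × List String)) (root : List String) (out : List String) : Decidable (Spec_get_all_cateid leaf_cate cateid2cateid root out) := by unfold Spec_get_all_cateid; infer_instance

-- ===== CLAIM (what is proved, stated in full; the proofs are below) =====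
def Claim_equal_get_all_cateid : Prop := ∀ (leaf_cate : List String) (cateid2cateid : List (String × List String)) (root : List String), Dom_get_all_cateid leaf_cate cateid2cateid root → Spec_get_all_cateid leaf_cate cateid2cateid root (get_all_cateid leaf_cate cateid2cateid root)

-- ===== LEMMAS AND PROOFS =====

-- `len(ne & root) > 0` (A's test) equals `bool(ne & root)` i.e. `¬ isdisjoint` (B's test)
theorem pv_hit_eq (ne root : List String) :
    (decide (0 < (PySem.Set.inter ne root).length)) = !(PySem.Set.isdisjoint ne root) := by
  by_cases h : PySem.Set.isdisjoint ne root = true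
  · have hd := (PySem.Set.isdisjoint_iff (s := ne) (t := root)).mp h
    simp [h]
    rcases hx : PySem.Set.inter ne root with _ | ⟨x, xs⟩
    · simp
    · exfalso
      have hmem : x ∈ PySem.Set.inter ne root := by rw [hx]; exact List.mem_cons_self
      rw [PySem.Set.mem_inter] at hmem
      exact hd x hmem.1 hmem.2
  · have h' : PySem.Set.isdisjoint ne root = false := by
      cases hb : PySem.Set.isdisjoint ne root
      · rfl
      · exact absurd hb h
    simp [h']
    by_contra hlen
    have hnil : PySem.Set.inter ne root = [] := by
      cases hi : PySem.Set.inter ne root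
      · rfl
      · exfalso; apply hlen; rw [hi]; simp
    apply h
    rw [PySem.Set.isdisjoint_iff]
    intro x hx hxr
    have hm : x ∈ PySem.Set.inter ne root := by
      rw [PySem.Set.mem_inter]; exact ⟨hx, hxr⟩
    rw [hnil] at hm
    simp at hm

-- the early-exit flag of A's scan is B's `any`
theorem pv_scan_fst (c2c : List (String × List String)) (root : List String) :
    ∀ (cs next : List String),
      (pvScanA c2c root cs next).1 = (pvNbrs c2c cs).any (fun ne => !(PySem.Set.isdisjoint ne root)) := by
  intro cs
  induction cs with
  | nil => intro next; simp [pvScanA, pvNbrs]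
  | cons c rest ih =>
    intro next
    cases hv : PySem.Dict.get? (PySem.Dict.mk c2c) c with
    | none =>
      simp only [pvScanA, pvNbrs, List.filterMap_cons, hv, Option.map_none]
      simpa [pvNbrs] using ih next
    | some v =>
      simp only [pvScanA, pvNbrs, List.filterMap_cons, hv, Option.map_some, List.any_cons]
      by_cases h : 0 < (PySem.Set.inter (PySem.Set.ofList v) root).length
      · have hb : (!(PySem.Set.isdisjoint (PySem.Set.ofList v) root)) = true := by
          rw [← pv_hit_eq]; simpa using h
        simp [h, hb]
      · have hb : (!(PySem.Set.isdisjoint (PySem.Set.ofList v) root)) = false := by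
          rw [← pv_hit_eq]; simpa using h
        simp [h, hb, pvNbrs, ih]

-- when nothing hits root, A's scan accumulates exactly B's fold of unions
theorem pv_scan_snd (c2c : List (String × List String)) (root : List String) :
    ∀ (cs next : List String),
      (pvScanA c2c root cs next).1 = false →
      (pvScanA c2c root cs next).2
        = (pvNbrs c2c cs).foldl (fun s ne => PySem.Set.union s ne) next := by
  intro cs
  induction cs with
  | nil => intro next _; simp [pvScanA, pvNbrs]
  | cons c rest ih =>
    intro next hf
    cases hv : PySem.Dict.get? (PySem.Dict.mk c2c) c with
    | none =>
      simp only [pvScanA, hv] at hf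
      simp only [pvScanA, pvNbrs, List.filterMap_cons, hv, Option.map_none]
      simpa [pvNbrs] using ih next hf
    | some v =>
      simp only [pvScanA, hv] at hf
      by_cases h : 0 < (PySem.Set.inter (PySem.Set.ofList v) root).length
      · rw [if_pos h] at hf; simp at hf
      · rw [if_neg h] at hf
        simp only [pvScanA, pvNbrs, List.filterMap_cons, hv, Option.map_some]
        rw [if_neg h]
        simp only [List.foldl_cons]
        simpa [pvNbrs] using ih _ hf

-- the two level loops agree step by step
theorem pv_main (c2c : List (String × List String)) (root : List String) :
    ∀ (fuel : Nat) (cs all : List String),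
      pvRecurA c2c root fuel cs all = pvLoopB c2c root fuel all cs := by
  intro fuel
  induction fuel with
  | zero => intro cs all; simp [pvRecurA, pvLoopB]
  | succ f ih =>
    intro cs all
    simp only [pvRecurA, pvLoopB]
    by_cases hcs : cs = []
    · subst hcs; simp
    · have h1 : ¬ cs.length = 0 := by simpa using hcs
      have h2 : ¬ cs.isEmpty = true := by simpa using hcs
      rw [if_neg h1, if_neg h2]
      have hfst := pv_scan_fst c2c root cs PySem.Set.empty
      cases hb : (pvScanA c2c root cs PySem.Set.empty).1 with
      | true =>
        have hany : ((pvNbrs c2c cs).any fun ne => !(PySem.Set.isdisjoint ne root)) = true := by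
          rw [← hfst]; exact hb
        simp [hany]
      | false =>
        have hany : ((pvNbrs c2c cs).any fun ne => !(PySem.Set.isdisjoint ne root)) = false := by
          rw [← hfst]; exact hb
        simp only [hany, Bool.false_eq_true, if_false]
        rw [pv_scan_snd c2c root cs PySem.Set.empty hb]
        exact ih _ _

-- ===== VERDICT (by name: the statement is the Claim_ definition above) =====
theorem get_all_cateid_spec : Claim_equal_get_all_cateid := by
  intro leaf_cate c2c root _
  unfold Spec_get_all_cateid get_all_cateid get_all_cateid_alt
  exact pv_main c2c root _ _ _
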